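-- pv_equiv track=rewrite | github.com/sehooni/Practice_coding | python_intro/old_file/220211ver/PythonData_example.py | mask_security_number
-- ===== SOURCE A (Python) =====
-- def mask_security_number(security_number):
--     security_number_list = list(security_number)
--
--     security_str = ""
--     for i in range(len(security_number_list)):
--         if len(security_number_list)-4 <= i:
--             security_number_list[i] = '*'
--         security_str += security_number_list[i]
--     return security_str
-- ===== SOURCE B (Python) =====
-- def mask_security_number(security_number):
--     items = list(security_number)
--     n = len(items)
--     return ''.join(items[:max(0, n - 4)]) + '*' * min(n, 4)
-- ===== Notes on version B (the rewrite author's own statement) =====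
-- stated objective: simpler
-- what changed: Replaces the per-character loop with in-place list mutation and string concatenation by a slice of the kept prefix plus a constant star string of length min(n,4).
import Mathlib
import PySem

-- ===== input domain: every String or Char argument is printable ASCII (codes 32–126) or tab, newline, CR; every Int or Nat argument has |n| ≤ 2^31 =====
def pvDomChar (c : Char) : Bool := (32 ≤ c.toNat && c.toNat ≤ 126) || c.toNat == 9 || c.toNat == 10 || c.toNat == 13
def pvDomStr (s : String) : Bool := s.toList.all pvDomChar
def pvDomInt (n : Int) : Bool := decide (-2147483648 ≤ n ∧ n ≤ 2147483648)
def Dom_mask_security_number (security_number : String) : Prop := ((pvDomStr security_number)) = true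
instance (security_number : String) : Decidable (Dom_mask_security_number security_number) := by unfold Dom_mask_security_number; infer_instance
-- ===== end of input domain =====

-- B replaces A's per-character loop (with in-place list mutation) by slicing the kept
-- prefix and appending a constant star run of length min(n,4); objective: simpler.

-- ===== PORT A =====
-- A: copy the string to a list, loop i over range(n): set position i to '*' when
-- n-4 <= i, then append list[i] to the accumulated string.
def mask_security_number (security_number : String) : String :=
  let l0 := security_number.toList
  let n := l0.length
  let res := (List.range n).foldl
    (fun (st : List Char × List Char) i =>
      let lst := if n - 4 ≤ i then st.1.set i '*' else st.1
      (lst, st.2 ++ [lst.getD i ' ']))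
    (l0, [])
  String.ofList res.2

-- ===== PORT B =====
def mask_security_number_alt (security_number : String) : String :=
  let items := security_number.toList
  let n := items.length
  String.ofList (items.take (n - 4)) ++ String.ofList (List.replicate (min n 4) '*')

-- ===== PRECONDITION & SPEC =====
def Spec_mask_security_number (security_number : String) (out : String) : Prop := out = mask_security_number_alt security_number
instance (security_number : String) (out : String) : Decidable (Spec_mask_security_number security_number out) := by unfold Spec_mask_security_number; infer_instance

-- ===== CLAIM (what is proved, stated in full; the proofs are below) =====
def Claim_equal_mask_security_number : Prop := ∀ (security_number : String), Dom_mask_security_number security_number → Spec_mask_security_number security_number (mask_security_number security_number)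

-- ===== LEMMAS AND PROOFS =====

-- Loop invariant for A's fold over range k: the list agrees with l0 at positions ≥ k
-- (and has l0's length), and the output so far is the masked image of range k.
theorem maskA_foldl_inv (l0 : List Char) (k : Nat) (hk : k ≤ l0.length) :
    ∃ lst : List Char,
      ((List.range k).foldl
        (fun (st : List Char × List Char) i =>
          let lst := if l0.length - 4 ≤ i then st.1.set i '*' else st.1
          (lst, st.2 ++ [lst.getD i ' ']))
        (l0, [])) =
        (lst, (List.range k).map (fun i => if l0.length - 4 ≤ i then '*' else l0.getD i ' '))
      ∧ lst.length = l0.length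
      ∧ (∀ j, k ≤ j → lst.getD j ' ' = l0.getD j ' ') := by
  induction k with
  | zero => exact ⟨l0, rfl, rfl, fun j _ => rfl⟩
  | succ k ih =>
    obtain ⟨lst, hfold, hlen, hag⟩ := ih (Nat.le_of_succ_le hk)
    rw [List.range_succ, List.foldl_append, hfold]
    simp only [List.foldl_cons, List.foldl_nil]
    by_cases hc : l0.length - 4 ≤ k
    · refine ⟨lst.set k '*', ?_, by simp [hlen], ?_⟩
      · simp only [hc, if_pos, List.map_append, List.map_cons, List.map_nil]
        have hk' : k < lst.length := by omega
        simp [List.getD, hk']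
      · intro j hj
        have hne : k ≠ j := by omega
        have := hag j (by omega)
        simpa [List.getD, List.getElem?_set_ne hne] using this
    · refine ⟨lst, ?_, hlen, fun j hj => hag j (by omega)⟩
      simp only [hc, if_neg, List.map_append, List.map_cons,
        List.map_nil, not_false_iff]
      rw [hag k (le_refl k)]

-- The masked image of range n is the kept prefix followed by min n 4 stars.
theorem mask_map_eq (l0 : List Char) :
    (List.range l0.length).map
        (fun i => if l0.length - 4 ≤ i then '*' else l0.getD i ' ')
      = l0.take (l0.length - 4) ++ List.replicate (min l0.length 4) '*' := by
  apply List.ext_getElem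
  · simp
  · intro i h1 h2
    by_cases hc : l0.length - 4 ≤ i
    · have hi : i < l0.length := by simpa using h1
      rw [List.getElem_map, List.getElem_range, if_pos hc]
      have hlt : ¬ i < (l0.take (l0.length - 4)).length := by
        simp; omega
      rw [List.getElem_append_right (by simpa using hlt)]
      exact (List.getElem_replicate _).symm
    · have hi : i < l0.length := by simpa using h1
      rw [List.getElem_map, List.getElem_range, if_neg hc]
      have hlt : i < (l0.take (l0.length - 4)).length := by simp; omega
      rw [List.getElem_append_left hlt, List.getElem_take]
      simp [List.getD, List.getElem?_eq_getElem hi]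

-- ===== VERDICT (by name: the statement is the Claim_ definition above) =====
theorem mask_security_number_spec : Claim_equal_mask_security_number := by
  intro s _
  unfold Spec_mask_security_number mask_security_number mask_security_number_alt
  obtain ⟨lst, hfold, -, -⟩ := maskA_foldl_inv s.toList s.toList.length (le_refl _)
  simp only [hfold, mask_map_eq]
  simp
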